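-- pv_equiv track=rewrite | github.com/Matheus2727/Polinomio | src/polinomio.py | somar_grupos
-- ===== SOURCE A (Python) =====
-- def somar_grupos(grupos):
--     """recebe uma lista de dicionarios representando polinomios, os soma
--     e retorna um dicionario"""
--     novo = {}
--     for grupo in grupos: # percorre a lista somando cada elemento em cada chave
--         for chave in grupo:
--             if chave not in novo.keys():
--                 novo[chave] = 0
--
--             novo[chave] += grupo[chave]
--
--     return novo
-- ===== SOURCE B (Python) =====
-- def somar_grupos(grupos):
--     """recebe uma lista de dicionarios representando polinomios, os soma
--     e retorna um dicionario"""
--     chaves = []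
--     vistas = set()
--     for grupo in grupos:
--         for chave in grupo:
--             if chave not in vistas:
--                 vistas.add(chave)
--                 chaves.append(chave)
--     return {chave: sum(grupo[chave] for grupo in grupos if chave in grupo)
--             for chave in chaves}
-- ===== Notes on version B (the rewrite author's own statement) =====
-- stated objective: alternative
-- what changed: A accumulates one dict in a single pass with per-key running totals; B first gathers all keys in first-seen order, then builds the result by summing each key's values across the groups (transposed two-phase algorithm).
import Mathlib
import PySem

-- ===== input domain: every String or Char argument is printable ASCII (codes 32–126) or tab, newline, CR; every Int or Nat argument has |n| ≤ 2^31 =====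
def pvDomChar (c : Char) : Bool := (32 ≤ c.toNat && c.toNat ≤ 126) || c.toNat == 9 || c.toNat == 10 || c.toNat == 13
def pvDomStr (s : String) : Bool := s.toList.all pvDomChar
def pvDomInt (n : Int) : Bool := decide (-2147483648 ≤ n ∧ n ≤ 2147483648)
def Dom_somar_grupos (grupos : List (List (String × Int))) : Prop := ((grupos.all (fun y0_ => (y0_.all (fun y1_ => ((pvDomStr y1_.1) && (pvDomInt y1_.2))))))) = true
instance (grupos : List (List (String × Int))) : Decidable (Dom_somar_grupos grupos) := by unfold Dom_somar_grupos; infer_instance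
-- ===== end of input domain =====

-- B replaces A's single accumulating-dict pass by a transposed two-phase algorithm (gather keys, then sum per key); objective: alternative decomposition, same result.

-- ===== PORT A =====
-- body of A's inner loop: ensure the key exists, then add the group's value
def pvStepA (grupo : List (String × Int)) (novo : PySem.Dict String Int) (chave : String) : PySem.Dict String Int :=
  let novo1 := if novo.contains chave then novo else novo.insert chave 0
  novo1.insert chave (novo1.getD chave 0 + (PySem.Dict.mk grupo).getD chave 0)

def somar_grupos (grupos : List (List (String × Int))) : List (String × Int) :=
  (grupos.foldl
    (fun novo grupo => (PySem.List.dedup (grupo.map Prod.fst)).foldl (pvStepA grupo) novo)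
    PySem.Dict.empty).items

-- ===== PORT B =====
def somar_grupos_alt (grupos : List (List (String × Int))) : List (String × Int) :=
  let chaves : PySem.Set String :=
    grupos.foldl
      (fun vistas grupo => (PySem.List.dedup (grupo.map Prod.fst)).foldl PySem.Set.add vistas)
      PySem.Set.empty
  chaves.map (fun chave =>
    (chave,
     ((grupos.filter (fun grupo => (PySem.Dict.mk grupo).contains chave)).map
        (fun grupo => (PySem.Dict.mk grupo).getD chave 0)).sum))

-- ===== PRECONDITION & SPEC =====
def Spec_somar_grupos (grupos : List (List (String × Int))) (out : List (String × Int)) : Prop := out = somar_grupos_alt grupos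
instance (grupos : List (List (String × Int))) (out : List (String × Int)) : Decidable (Spec_somar_grupos grupos out) := by unfold Spec_somar_grupos; infer_instance

-- ===== CLAIM (what is proved, stated in full; the proofs are below) =====
def Claim_equal_somar_grupos : Prop := ∀ (grupos : List (List (String × Int))), Dom_somar_grupos grupos → Spec_somar_grupos grupos (somar_grupos grupos)

-- ===== LEMMAS AND PROOFS =====

-- the loop bodies reused by the lemmas
def pvOuterA (novo : PySem.Dict String Int) (grupo : List (String × Int)) : PySem.Dict String Int :=
  (PySem.List.dedup (grupo.map Prod.fst)).foldl (pvStepA grupo) novo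

-- per-key contribution of the processed prefix, in A's count form
def pvSumA (grupos : List (List (String × Int))) (k : String) : Int :=
  (grupos.map (fun g => ((PySem.List.dedup (g.map Prod.fst)).count k : Int) * (PySem.Dict.mk g).getD k 0)).sum

theorem pvStepA_keys (g : List (String × Int)) (d : PySem.Dict String Int) (c : String) :
    (pvStepA g d c).keys = PySem.Set.add d.keys c := by
  unfold pvStepA
  by_cases h : d.contains c = true
  · simp only [h, if_true]
    rw [PySem.Dict.keys_insert_of_contains d _ h,
        PySem.Set.add_of_mem ((PySem.Dict.contains_iff_mem_keys d c).mp h)]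
  · have h' : d.contains c = false := by simpa using h
    simp only [h', Bool.false_eq_true, if_false]
    rw [PySem.Dict.keys_insert_of_contains _ _ (PySem.Dict.contains_insert_self d c 0),
        PySem.Dict.keys_insert_of_not_contains d _ h',
        PySem.Set.add_of_not_mem (fun hm => by simp [(PySem.Dict.contains_iff_mem_keys d c).mpr hm] at h')]

theorem pvStepA_getD (g : List (String × Int)) (d : PySem.Dict String Int) (c k : String) :
    (pvStepA g d c).getD k 0 =
      if k = c then d.getD c 0 + (PySem.Dict.mk g).getD c 0 else d.getD k 0 := by
  unfold pvStepA
  by_cases h : d.contains c = true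
  · simp only [h, if_true, PySem.Dict.getD_insert]
  · have h' : d.contains c = false := by simpa using h
    simp only [h', Bool.false_eq_true, if_false]
    rw [PySem.Dict.getD_insert, PySem.Dict.getD_insert_self, PySem.Dict.getD_of_not_contains d 0 h']
    split_ifs with hk
    · rfl
    · rw [PySem.Dict.getD_insert, if_neg hk]

theorem pvFoldA_keys (g : List (String × Int)) (l : List String) (d : PySem.Dict String Int) :
    (l.foldl (pvStepA g) d).keys = l.foldl PySem.Set.add d.keys := by
  induction l generalizing d with
  | nil => rfl
  | cons c l ih => simp only [List.foldl_cons, ih, pvStepA_keys]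

theorem pvFoldA_getD (g : List (String × Int)) (l : List String) (d : PySem.Dict String Int) (k : String) :
    (l.foldl (pvStepA g) d).getD k 0 =
      d.getD k 0 + (l.count k : Int) * (PySem.Dict.mk g).getD k 0 := by
  induction l generalizing d with
  | nil => simp
  | cons c l ih =>
      simp only [List.foldl_cons, ih, pvStepA_getD, List.count_cons]
      by_cases hk : k = c
      · subst hk; simp; ring
      · have hck : ¬ c = k := fun h => hk h.symm
        simp [hk, hck]

theorem pvLoopA_keys (grupos : List (List (String × Int))) (d : PySem.Dict String Int) :
    (grupos.foldl pvOuterA d).keys =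
      grupos.foldl (fun s g => (PySem.List.dedup (g.map Prod.fst)).foldl PySem.Set.add s) d.keys := by
  induction grupos generalizing d with
  | nil => rfl
  | cons g gs ih => simp only [List.foldl_cons, ih, pvOuterA, pvFoldA_keys]

theorem pvLoopA_getD (grupos : List (List (String × Int))) (d : PySem.Dict String Int) (k : String) :
    (grupos.foldl pvOuterA d).getD k 0 = d.getD k 0 + pvSumA grupos k := by
  induction grupos generalizing d with
  | nil => simp [pvSumA]
  | cons g gs ih =>
      simp only [List.foldl_cons, ih, pvOuterA, pvFoldA_getD, pvSumA, List.map_cons, List.sum_cons]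
      ring

theorem pvSumA_eq_filter (grupos : List (List (String × Int))) (k : String) :
    pvSumA grupos k =
      ((grupos.filter (fun g => (PySem.Dict.mk g).contains k)).map
        (fun g => (PySem.Dict.mk g).getD k 0)).sum := by
  induction grupos with
  | nil => rfl
  | cons g gs ih =>
      simp only [pvSumA] at ih ⊢
      rw [List.map_cons, List.sum_cons, List.filter_cons]
      by_cases h : (PySem.Dict.mk g).contains k = true
      · have hm : k ∈ g.map Prod.fst := by
          rw [← PySem.Dict.keys_mk g]; exact (PySem.Dict.contains_iff_mem_keys _ k).mp h
        rw [if_pos h, List.map_cons, List.sum_cons,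
            List.count_eq_one_of_mem (PySem.List.nodup_dedup _) ((PySem.List.mem_dedup _ k).mpr hm), ih]
        simp
      · have hm : k ∉ g.map Prod.fst := fun hm => by
          exact h ((PySem.Dict.contains_iff_mem_keys (PySem.Dict.mk g) k).mpr (by rw [PySem.Dict.keys_mk]; exact hm))
        rw [if_neg h, List.count_eq_zero_of_not_mem (fun hc => hm ((PySem.List.mem_dedup _ k).mp hc)), ih]
        simp

theorem pvItems_eq (d : PySem.Dict String Int) (h : d.keys.Nodup) :
    d.items = d.keys.map (fun k => (k, d.getD k 0)) := by
  have hk : d.keys = d.items.map Prod.fst := by cases d; rfl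
  rw [hk, List.map_map]
  symm
  calc d.items.map (fun p => (p.1, d.getD p.1 0))
      = d.items.map id := by
        apply List.map_congr_left
        intro p hp
        have := PySem.Dict.getD_of_mem_items (d := d) (k := p.1) (v := p.2) (by simpa using hp) h 0
        simp [this]
    _ = d.items := List.map_id _

theorem pvChaves_nodup (grupos : List (List (String × Int))) (s : PySem.Set String) (hs : s.Nodup) :
    (grupos.foldl (fun s g => (PySem.List.dedup (g.map Prod.fst)).foldl PySem.Set.add s) s).Nodup := by
  induction grupos generalizing s with
  | nil => exact hs
  | cons g gs ih =>
      exact ih _ (PySem.Set.nodup_update s (PySem.List.dedup (g.map Prod.fst)) hs)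

-- ===== VERDICT =====

theorem somar_grupos_spec : Claim_equal_somar_grupos := by
  intro grupos _
  unfold Spec_somar_grupos somar_grupos somar_grupos_alt
  have hfold : ∀ novo : PySem.Dict String Int,
      grupos.foldl (fun novo grupo => (PySem.List.dedup (grupo.map Prod.fst)).foldl (pvStepA grupo) novo) novo
        = grupos.foldl pvOuterA novo := by
    intro novo; rfl
  rw [hfold]
  set D := grupos.foldl pvOuterA PySem.Dict.empty with hD
  have hkeys : D.keys = grupos.foldl
      (fun s g => (PySem.List.dedup (g.map Prod.fst)).foldl PySem.Set.add s) PySem.Set.empty := by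
    rw [hD, pvLoopA_keys]; rfl
  have hnd : D.keys.Nodup := by
    rw [hkeys]; exact pvChaves_nodup grupos _ List.nodup_nil
  rw [pvItems_eq D hnd, hkeys]
  apply List.map_congr_left
  intro k _
  rw [hD, pvLoopA_getD, PySem.Dict.getD_empty, pvSumA_eq_filter]
  simp
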